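-- pv_equiv track=rewrite | github.com/ascyzor/WildDet3D | demo/huggingface/vis3d_glb.py | _generate_box_colors
-- ===== SOURCE A (Python) =====
-- def _generate_box_colors(n_boxes: int) -> list[list[int]]:
--     """Generate distinct colors for boxes."""
--     base_colors = [
--         [255, 0, 0, 255],    # red
--         [0, 255, 0, 255],    # green
--         [0, 100, 255, 255],  # blue
--         [255, 255, 0, 255],  # yellow
--         [255, 0, 255, 255],  # magenta
--         [0, 255, 255, 255],  # cyan
--         [255, 128, 0, 255],  # orange
--         [128, 0, 255, 255],  # purple
--     ]
--     colors = []
--     for i in range(n_boxes):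
--         colors.append(base_colors[i % len(base_colors)])
--     return colors
-- ===== SOURCE B (Python) =====
-- def _generate_box_colors(n_boxes: int) -> list[list[int]]:
--     """Generate distinct colors for boxes."""
--     base_colors = [
--         [255, 0, 0, 255],    # red
--         [0, 255, 0, 255],    # green
--         [0, 100, 255, 255],  # blue
--         [255, 255, 0, 255],  # yellow
--         [255, 0, 255, 255],  # magenta
--         [0, 255, 255, 255],  # cyan
--         [255, 128, 0, 255],  # orange
--         [128, 0, 255, 255],  # purple
--     ]
--     reps = -(-n_boxes // len(base_colors))  # ceiling division
--     return (base_colors * reps)[:n_boxes]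
-- ===== Notes on version B (the rewrite author's own statement) =====
-- stated objective: simpler
-- what changed: Replaces the per-index modulo loop by ceiling-division replication of the palette followed by a slice to n_boxes.
import Mathlib
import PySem

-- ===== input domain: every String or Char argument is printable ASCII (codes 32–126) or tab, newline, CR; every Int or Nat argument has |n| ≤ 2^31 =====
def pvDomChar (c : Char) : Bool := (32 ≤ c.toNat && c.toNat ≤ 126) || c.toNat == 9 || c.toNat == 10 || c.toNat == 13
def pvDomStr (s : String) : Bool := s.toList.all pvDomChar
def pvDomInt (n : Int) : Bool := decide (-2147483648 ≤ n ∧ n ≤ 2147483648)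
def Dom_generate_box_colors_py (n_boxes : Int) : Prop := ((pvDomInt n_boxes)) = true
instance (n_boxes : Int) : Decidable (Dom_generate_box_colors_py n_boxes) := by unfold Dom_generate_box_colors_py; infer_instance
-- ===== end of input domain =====

-- B replaces A's per-index modulo loop by ceiling-division replication of the palette plus a slice (simpler decomposition).

def pvBaseColors : List (List Int) :=
  [[255, 0, 0, 255],    -- red
   [0, 255, 0, 255],    -- green
   [0, 100, 255, 255],  -- blue
   [255, 255, 0, 255],  -- yellow
   [255, 0, 255, 255],  -- magenta
   [0, 255, 255, 255],  -- cyan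
   [255, 128, 0, 255],  -- orange
   [128, 0, 255, 255]]  -- purple

-- ===== PORT A =====
-- loop: colors.append(base_colors[i % len(base_colors)]) for i in range(n_boxes)
def generate_box_colors_py (n_boxes : Int) : List (List Int) :=
  (PySem.List.pyRange 0 n_boxes 1).foldl
    (fun colors i =>
      colors ++ [PySem.List.pyGetD pvBaseColors (PySem.Int.mod i (pvBaseColors.length : Int)) []])
    []

-- ===== PORT B =====
-- reps = -(-n_boxes // len(base_colors)); return (base_colors * reps)[:n_boxes]
def generate_box_colors_py_alt (n_boxes : Int) : List (List Int) :=
  let reps : Int := -(PySem.Int.floordiv (-n_boxes) (pvBaseColors.length : Int))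
  PySem.List.slice (List.flatten (List.replicate reps.toNat pvBaseColors)) none (some n_boxes)

-- ===== PRECONDITION & SPEC =====
def Spec_generate_box_colors_py (n_boxes : Int) (out : List (List Int)) : Prop := out = generate_box_colors_py_alt n_boxes
instance (n_boxes : Int) (out : List (List Int)) : Decidable (Spec_generate_box_colors_py n_boxes out) := by unfold Spec_generate_box_colors_py; infer_instance

-- ===== CLAIM (what is proved, stated in full; the proofs are below) =====
def Claim_equal_generate_box_colors_py : Prop := ∀ (n_boxes : Int), Dom_generate_box_colors_py n_boxes → Spec_generate_box_colors_py n_boxes (generate_box_colors_py n_boxes)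

-- ===== LEMMAS AND PROOFS =====

def pvColorAt (k : Nat) : List Int := pvBaseColors.getD (k % 8) []

-- A's loop, characterised: the i-th color is base_colors[i % 8]
theorem pvA_eq (n : Int) :
    generate_box_colors_py n = (List.range n.toNat).map pvColorAt := by
  unfold generate_box_colors_py
  rw [PySem.List.pyRange_one, PySem.List.foldl_append_singleton_eq_map]
  rw [List.nil_append, List.map_map]
  simp only [Int.sub_zero]
  apply List.map_congr_left
  intro k _
  simp only [Function.comp]
  have hc : PySem.Int.mod (0 + (k : Int)) (pvBaseColors.length : Int) = ((k % 8 : Nat) : Int) := by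
    have h8 : (pvBaseColors.length : Int) = 8 := by decide
    rw [h8, Int.zero_add]
    exact_mod_cast PySem.Int.mod_natCast k 8
  rw [hc, PySem.List.pyGetD_natCast]
  rfl

-- the replicated palette, characterised elementwise
theorem pvFlat_eq (r : Nat) :
    List.flatten (List.replicate r pvBaseColors) = (List.range (r * 8)).map pvColorAt := by
  induction r with
  | zero => simp
  | succ r ih =>
      rw [List.replicate_succ', List.flatten_append, ih]
      have hrange : List.range ((r + 1) * 8) = List.range (r * 8) ++ (List.range 8).map (fun j => r * 8 + j) := by
        rw [Nat.succ_mul, List.range_add]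
      rw [hrange, List.map_append, List.map_map]
      congr 1
      have : ∀ j ∈ List.range 8, (pvColorAt ∘ fun j => r * 8 + j) j = pvBaseColors.getD j [] := by
        intro j hj
        have hj8 : j < 8 := List.mem_range.mp hj
        simp only [Function.comp, pvColorAt]
        rw [Nat.add_comm, Nat.add_mul_mod_self_right, Nat.mod_eq_of_lt hj8]
      rw [List.map_congr_left this]
      decide

-- ===== VERDICT (by name: the statement is the Claim_ definition above) =====

theorem generate_box_colors_py_spec : Claim_equal_generate_box_colors_py := by
  intro n _
  unfold Spec_generate_box_colors_py generate_box_colors_py_alt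
  rw [pvA_eq]
  show List.map pvColorAt (List.range n.toNat) =
    PySem.List.slice
      (List.flatten (List.replicate (-(PySem.Int.floordiv (-n) (pvBaseColors.length : Int))).toNat pvBaseColors))
      none (some n)
  set q : Int := -(PySem.Int.floordiv (-n) (pvBaseColors.length : Int)) with hq
  rw [pvFlat_eq]
  by_cases hn : 0 ≤ n
  · rw [PySem.List.slice_to _ hn, ← List.map_take, List.take_range]
    have hb : -(PySem.Int.floordiv (-n) ((pvBaseColors.length : Int))) = q := by rw [hq]
    have hlen : (pvBaseColors.length : Int) = 8 := by decide
    rw [hlen] at hb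
    have hbd := (PySem.Int.neg_floordiv_neg_eq_iff_of_pos (a := n) (b := 8) (q := q) (by omega)).mp hb
    have : n.toNat ≤ q.toNat * 8 := by omega
    rw [Nat.min_eq_left this]
  · have hq0 : q.toNat = 0 := by
      have hlen : (pvBaseColors.length : Int) = 8 := by decide
      rw [hq, hlen]
      have h0 : (0:Int) ≤ PySem.Int.floordiv (-n) 8 := by
        have := (PySem.Int.le_floordiv_iff_mul_le (a := -n) (b := 8) (q := 0) (by omega)).mpr (by omega)
        exact this
      omega
    rw [hq0]
    simp [PySem.List.slice]
    omega
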